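-- pv_equiv track=rewrite | github.com/jonathanmarmor/animalplay | harmony_options.py | get_interval_content
-- ===== SOURCE A (Python) =====
-- from collections import Counter
--
-- def get_interval_content(chord):
--     """Get counts of each interval appearing in a chord
--     (m2, M2, m3, M3, P4, TT)
--
--     >>> get_interval_content((4, 3, 5))
--     (0, 0, 2, 2, 2, 0)
--
--     >>> get_interval_content((4, 3, 3, 2))
--     (0, 2, 4, 2, 2, 2)
--
--     """
--     chord = list(chord)
--     content = Counter()
--     n_intervals = len(chord)
--     for width in range(1, n_intervals):
--         for i, n in enumerate(chord):
--             if i + width < n_intervals: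
--                 notes = chord[i:i + width]
--             else:
--                 notes = chord[i:] + chord[:(i + width) % n_intervals]
--             interval = sum(notes)
--             if interval < 6:
--                 content[interval] += 1
--     return tuple([content[i] for i in range(1, 7)])
-- ===== SOURCE B (Python) =====
-- def get_interval_content(chord):
--     """Prefix sums over the doubled list give each circular window sum in O(1)."""
--     chord = list(chord)
--     n = len(chord)
--     prefix = [0]
--     total = 0
--     for x in chord + chord:
--         total += x
--         prefix.append(total)
--     cnt = [0] * 6
--     for width in range(1, n):
--         for i in range(n):
--             s = prefix[i + width] - prefix[i]
--             if 1 <= s < 6: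
--                 cnt[s - 1] += 1
--     return tuple(cnt)
-- ===== Notes on version B (the rewrite author's own statement) =====
-- stated objective: faster
-- what changed: Replaces the per-window slice-and-sum (each window rebuilt and summed) and the Counter with one prefix-sum array over the doubled list giving every circular window sum in O(1), tallied directly into a fixed 6-slot array.
import Mathlib
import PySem

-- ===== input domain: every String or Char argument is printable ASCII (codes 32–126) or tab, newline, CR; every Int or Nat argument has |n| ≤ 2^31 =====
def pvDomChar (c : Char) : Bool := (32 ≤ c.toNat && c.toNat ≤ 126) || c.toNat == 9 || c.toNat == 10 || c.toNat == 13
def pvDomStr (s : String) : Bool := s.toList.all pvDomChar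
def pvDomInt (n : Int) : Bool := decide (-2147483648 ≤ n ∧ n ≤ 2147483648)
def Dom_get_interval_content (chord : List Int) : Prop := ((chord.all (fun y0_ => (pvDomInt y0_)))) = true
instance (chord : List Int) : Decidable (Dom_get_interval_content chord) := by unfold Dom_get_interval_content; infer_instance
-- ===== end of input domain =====

-- B replaces A's per-window slice-and-sum and Counter by one prefix-sum array over the
-- doubled list (each circular window sum read off in O(1)) tallied into a fixed 6-slot array.

-- ===== PORT A =====
def get_interval_content (chord : List Int) : List Int :=
  let n : Int := chord.length
  let content : PySem.Dict Int Int :=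
    (PySem.List.pyRange 1 n 1).foldl (fun content width =>
      (PySem.List.enumerate chord).foldl (fun content iv =>
        let notes : List Int :=
          if iv.1 + width < n then PySem.List.slice chord (some iv.1) (some (iv.1 + width))
          else PySem.List.slice chord (some iv.1) none ++
               PySem.List.slice chord none (some (PySem.Int.mod (iv.1 + width) n))
        let interval := notes.sum
        if interval < 6 then content.modify interval 0 (· + 1) else content)
        content)
      PySem.Dict.empty
  (PySem.List.pyRange 1 7 1).map (fun i => content.getD i 0)

-- ===== PORT B =====
def get_interval_content_alt (chord : List Int) : List Int :=
  let n : Int := chord.length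
  let pt : List Int × Int :=
    (chord ++ chord).foldl (fun pt x => (pt.1 ++ [pt.2 + x], pt.2 + x)) ([0], 0)
  let cnt0 : List Int := List.replicate 6 0
  (PySem.List.pyRange 1 n 1).foldl (fun cnt width =>
    (PySem.List.pyRange 0 n 1).foldl (fun cnt i =>
      let s := PySem.List.pyGetD pt.1 (i + width) 0 - PySem.List.pyGetD pt.1 i 0
      -- whenever the branch is taken s-1 is in [0,5), and i, i+width index into the
      -- prefix list in range, so .set / .toNat / pyGetD are exact for Source B here
      if 1 ≤ s ∧ s < 6 then cnt.set (s - 1).toNat (PySem.List.pyGetD cnt (s - 1) 0 + 1)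
      else cnt) cnt) cnt0

-- ===== PRECONDITION & SPEC =====
def Spec_get_interval_content (chord : List Int) (out : List Int) : Prop := out = get_interval_content_alt chord
instance (chord : List Int) (out : List Int) : Decidable (Spec_get_interval_content chord out) := by unfold Spec_get_interval_content; infer_instance

-- ===== CLAIM (what is proved, stated in full; the proofs are below) =====
def Claim_equal_get_interval_content : Prop := ∀ (chord : List Int), Dom_get_interval_content chord → Spec_get_interval_content chord (get_interval_content chord)

-- ===== LEMMAS AND PROOFS =====

def pvWin (chord : List Int) (i w : Int) : Int :=
  (((chord ++ chord).drop i.toNat).take w.toNat).sum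

def pvVals (chord : List Int) : List Int :=
  ((PySem.List.pyRange 1 (chord.length : Int) 1).map (fun w =>
    (PySem.List.pyRange 0 (chord.length : Int) 1).map (fun i => pvWin chord i w))).flatten

lemma pv_enum_fst {α : Type} (xs : List α) : ∀ s : Int,
    (PySem.List.enumerate xs s).map Prod.fst = PySem.List.pyRange s (s + xs.length) 1 := by
  induction xs with
  | nil => intro s; simp [PySem.List.enumerate, PySem.List.pyRange_one_eq_nil]
  | cons x xs ih =>
    intro s
    rw [PySem.List.enumerate_cons, PySem.List.pyRange_one_cons (by
      simp only [List.length_cons]; push_cast; omega)]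
    simp only [List.map_cons, ih (s+1), List.length_cons]
    congr 2
    push_cast; ring

lemma pv_notes_eq (chord : List Int) (i w : Int) (h0 : 0 ≤ i) (hi : i < (chord.length : Int))
    (h1 : 1 ≤ w) (hw : w < (chord.length : Int)) :
    (if i + w < (chord.length : Int) then PySem.List.slice chord (some i) (some (i + w))
     else PySem.List.slice chord (some i) none ++
          PySem.List.slice chord none (some (PySem.Int.mod (i + w) (chord.length : Int)))).sum
      = pvWin chord i w := by
  unfold pvWin
  have hdrop : (chord ++ chord).drop i.toNat = chord.drop i.toNat ++ chord :=
    List.drop_append_of_le_length (by omega)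
  rw [hdrop]
  split_ifs with h
  · rw [PySem.List.slice_toNat chord h0 (by omega),
      show (i + w).toNat - i.toNat = w.toNat by omega,
      List.take_append_of_le_length (by simp only [List.length_drop]; omega)]
  · rw [PySem.List.slice_from chord h0,
      PySem.Int.mod_eq_emod_of_pos (by omega),
      show (i + w) % (chord.length : Int) = (i + w) - (chord.length : Int) by
        rw [← Int.sub_emod_right (i + w) (chord.length : Int)]
        exact Int.emod_eq_of_lt (by omega) (by omega),
      PySem.List.slice_to chord (by omega),
      List.take_append, List.sum_append, List.sum_append,
      List.take_of_length_le (l := chord.drop i.toNat) (by simp only [List.length_drop]; omega)]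
    congr 3
    simp only [List.length_drop]
    omega

lemma pv_A_eq (chord : List Int) :
    get_interval_content chord = (PySem.List.pyRange 1 7 1).map
      (fun k => (((pvVals chord).filter (fun v => decide (v < 6))).count k : Int)) := by
  simp only [get_interval_content]
  have hc : ((PySem.List.pyRange 1 (chord.length : Int) 1).foldl (fun (content : PySem.Dict Int Int) width =>
      (PySem.List.enumerate chord).foldl (fun content iv =>
        if (if iv.1 + width < (chord.length : Int) then PySem.List.slice chord (some iv.1) (some (iv.1 + width))
          else PySem.List.slice chord (some iv.1) none ++
               PySem.List.slice chord none (some (PySem.Int.mod (iv.1 + width) (chord.length : Int)))).sum < 6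
        then content.modify (if iv.1 + width < (chord.length : Int) then PySem.List.slice chord (some iv.1) (some (iv.1 + width))
          else PySem.List.slice chord (some iv.1) none ++
               PySem.List.slice chord none (some (PySem.Int.mod (iv.1 + width) (chord.length : Int)))).sum 0 (· + 1)
        else content)
        content)
      PySem.Dict.empty)
      = (pvVals chord).foldl (fun d v => if v < 6 then d.modify v 0 (· + 1) else d) PySem.Dict.empty := by
    have he : PySem.List.pyRange 0 (chord.length : Int) 1 = (PySem.List.enumerate chord).map Prod.fst := by
      rw [pv_enum_fst chord 0, zero_add]
    have hb : ∀ iv ∈ PySem.List.enumerate chord, (0:Int) ≤ iv.1 ∧ iv.1 < (chord.length : Int) := by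
      intro iv hiv
      have : iv.1 ∈ (PySem.List.enumerate chord).map Prod.fst := List.mem_map_of_mem hiv
      rw [← he] at this
      exact PySem.List.mem_pyRange_one.mp this
    rw [PySem.List.foldl_congr_mem _ _ (fun (d : PySem.Dict Int Int) w =>
        ((PySem.List.pyRange 0 (chord.length : Int) 1).map (fun i => pvWin chord i w)).foldl
          (fun d v => if v < 6 then d.modify v 0 (· + 1) else d) d) _ ?_]
    · rw [← List.foldl_map (f := fun w => (PySem.List.pyRange 0 (chord.length : Int) 1).map (fun i => pvWin chord i w)),
        ← List.foldl_flatten]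
      rfl
    · intro acc w hw
      obtain ⟨hw1, hw2⟩ := PySem.List.mem_pyRange_one.mp hw
      beta_reduce
      rw [List.foldl_map, he, List.foldl_map]
      refine PySem.List.foldl_congr_mem _ _ _ _ ?_
      intro d iv hiv
      obtain ⟨hi1, hi2⟩ := hb iv hiv
      rw [pv_notes_eq chord iv.1 w hi1 hi2 hw1 hw2]
  rw [hc, PySem.List.foldl_ite_eq_foldl_filter (p := fun v => v < 6)
    (f := fun (d : PySem.Dict Int Int) v => d.modify v 0 (· + 1))]
  apply List.map_congr_left
  intro k _
  rw [PySem.Dict.getD_foldl_modify_add_one]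
  simp [pysem]

def pvScan (t : Int) : List Int → List Int
  | [] => []
  | x :: xs => (t + x) :: pvScan (t + x) xs

lemma pvScan_getD : ∀ (l : List Int) (t : Int) (j : Nat), j ≤ l.length →
    (t :: pvScan t l).getD j 0 = t + (l.take j).sum := by
  intro l
  induction l with
  | nil =>
    intro t j hj
    simp only [List.length_nil, Nat.le_zero] at hj
    subst hj; simp
  | cons x xs ih =>
    intro t j hj
    cases j with
    | zero => simp
    | succ j =>
      simpa [pvScan, List.take_succ_cons, add_assoc] using ih (t + x) j (by simpa using hj)

lemma pv_foldPref : ∀ (l : List Int) (P : List Int) (t : Int),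
    l.foldl (fun pt x => (pt.1 ++ [pt.2 + x], pt.2 + x)) (P, t) = (P ++ pvScan t l, t + l.sum) := by
  intro l
  induction l with
  | nil => intro P t; simp [pvScan]
  | cons x xs ih =>
    intro P t
    simp only [List.foldl_cons, ih, pvScan, List.sum_cons, Prod.mk.injEq]
    refine ⟨by simp, by ring⟩

lemma pv_s_eq (chord : List Int) (i w : Int) (h0 : 0 ≤ i) (hi : i < (chord.length : Int))
    (h1 : 0 ≤ w) (hw : w < (chord.length : Int)) :
    PySem.List.pyGetD (0 :: pvScan 0 (chord ++ chord)) (i + w) 0 -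
      PySem.List.pyGetD (0 :: pvScan 0 (chord ++ chord)) i 0 = pvWin chord i w := by
  rw [PySem.List.pyGetD_of_nonneg _ _ (by omega), PySem.List.pyGetD_of_nonneg _ _ h0,
    pvScan_getD _ 0 _ (by simp only [List.length_append]; omega),
    pvScan_getD _ 0 _ (by simp only [List.length_append]; omega),
    show (i + w).toNat = i.toNat + w.toNat by omega,
    List.take_add, List.sum_append]
  unfold pvWin
  ring

lemma pv_cnt_len (L : List Int) : ∀ (c : List Int),
    (L.foldl (fun c v => c.set (v - 1).toNat (PySem.List.pyGetD c (v - 1) 0 + 1)) c).length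
      = c.length := by
  induction L with
  | nil => intro c; rfl
  | cons v L ih => intro c; rw [List.foldl_cons, ih, List.length_set]

lemma pv_cnt_fold (L : List Int) : ∀ (c : List Int), (∀ v ∈ L, 1 ≤ v ∧ v < 6) → c.length = 6 →
    ∀ j : Nat, j < 6 →
    (L.foldl (fun c v => c.set (v - 1).toNat (PySem.List.pyGetD c (v - 1) 0 + 1)) c).getD j 0
      = c.getD j 0 + (L.count ((j : Int) + 1) : Int) := by
  induction L with
  | nil => intro c _ _ j _; simp
  | cons v L ih =>
    intro c hv hc j hj
    obtain ⟨hv1, hv6⟩ := hv v List.mem_cons_self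
    rw [List.foldl_cons, ih _ (fun x hx => hv x (List.mem_cons_of_mem v hx)) (by rw [List.length_set, hc]) j hj,
      List.count_cons]
    rw [PySem.List.pyGetD_of_nonneg _ _ (by omega)]
    by_cases hvj : v = (j : Int) + 1
    · have hidx : (v - 1).toNat = j := by omega
      rw [hidx, if_pos (beq_iff_eq.mpr hvj)]
      have : (c.set j (c.getD j 0 + 1)).getD j 0 = c.getD j 0 + 1 := by
        simp [List.getD, hc, hj]
      rw [this]
      push_cast; ring
    · have hidx : (v - 1).toNat ≠ j := by omega
      rw [if_neg (by simp only [beq_iff_eq]; exact hvj)]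
      have : (c.set (v - 1).toNat (c.getD (v - 1).toNat 0 + 1)).getD j 0 = c.getD j 0 := by
        simp only [List.getD]
        rw [List.getElem?_set_ne hidx]
      rw [this]
      simp

lemma pv_count_filter_eq (V : List Int) (k : Int) (h1 : 1 ≤ k) :
    (V.filter (fun v => decide (v < 6))).count k
      = (V.filter (fun v => decide (1 ≤ v ∧ v < 6))).count k := by
  by_cases h6 : k < 6
  · rw [List.count_filter (by simpa using h6), List.count_filter (by simp [h1, h6])]
  · rw [List.count_eq_zero.mpr (fun hm => by have := List.of_mem_filter hm; simp at this; omega),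
      List.count_eq_zero.mpr (fun hm => by have := List.of_mem_filter hm; simp at this; omega)]

lemma pv_B_fold (chord : List Int) :
    get_interval_content_alt chord
      = ((pvVals chord).filter (fun v => decide (1 ≤ v ∧ v < 6))).foldl
          (fun c v => c.set (v - 1).toNat (PySem.List.pyGetD c (v - 1) 0 + 1))
          (List.replicate 6 0) := by
  simp only [get_interval_content_alt, pv_foldPref]
  rw [PySem.List.foldl_congr_mem _ _ (fun (c : List Int) w =>
      ((PySem.List.pyRange 0 (chord.length : Int) 1).map (fun i => pvWin chord i w)).foldl
        (fun c v => if 1 ≤ v ∧ v < 6 then c.set (v - 1).toNat (PySem.List.pyGetD c (v - 1) 0 + 1)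
          else c) c) _ ?_]
  · rw [← List.foldl_map (f := fun w => (PySem.List.pyRange 0 (chord.length : Int) 1).map (fun i => pvWin chord i w)),
      ← List.foldl_flatten,
      PySem.List.foldl_ite_eq_foldl_filter (p := fun v => 1 ≤ v ∧ v < 6)
        (f := fun (c : List Int) v => c.set (v - 1).toNat (PySem.List.pyGetD c (v - 1) 0 + 1))]
    rfl
  · intro acc w hw
    obtain ⟨hw1, hw2⟩ := PySem.List.mem_pyRange_one.mp hw
    beta_reduce
    rw [List.foldl_map]
    refine PySem.List.foldl_congr_mem _ _ _ _ ?_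
    intro c i hi
    obtain ⟨hi1, hi2⟩ := PySem.List.mem_pyRange_one.mp hi
    rw [show ([(0:Int)] ++ pvScan 0 (chord ++ chord)) = 0 :: pvScan 0 (chord ++ chord) from rfl,
      pv_s_eq chord i w hi1 hi2 (by omega) hw2]

theorem pv_main (chord : List Int) : get_interval_content chord = get_interval_content_alt chord := by
  rw [pv_A_eq, pv_B_fold]
  have hfilt : ∀ v ∈ (pvVals chord).filter (fun v => decide (1 ≤ v ∧ v < 6)), 1 ≤ v ∧ v < 6 := by
    intro v hv
    simpa using List.of_mem_filter hv
  have hlen : (((pvVals chord).filter (fun v => decide (1 ≤ v ∧ v < 6))).foldl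
      (fun c v => c.set (v - 1).toNat (PySem.List.pyGetD c (v - 1) 0 + 1))
      (List.replicate 6 (0:Int))).length = 6 := by
    exact (pv_cnt_len _ _).trans rfl
  have hlenL : ((PySem.List.pyRange 1 7 1).map
      (fun k => ((((pvVals chord).filter (fun v => decide (v < 6))).count k : Int)))).length = 6 := by
    simp [PySem.List.length_pyRange_one]
  apply List.ext_getElem?
  intro j
  by_cases hj : j < 6
  · rw [List.getElem?_eq_getElem (by rw [hlenL]; omega), List.getElem?_eq_getElem (by rw [hlen]; omega)]
    congr 1
    rw [← List.getD_eq_getElem (((pvVals chord).filter (fun v => decide (1 ≤ v ∧ v < 6))).foldl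
        (fun c v => c.set (v - 1).toNat (PySem.List.pyGetD c (v - 1) 0 + 1))
        (List.replicate 6 (0:Int))) 0 (by rw [hlen]; omega),
      pv_cnt_fold _ _ hfilt rfl j hj]
    rw [List.getElem_map, PySem.List.getElem_pyRange_one,
      pv_count_filter_eq (pvVals chord) (1 + (j : Int)) (by omega)]
    simp [add_comm]
    interval_cases j <;> rfl
  · rw [List.getElem?_eq_none (by rw [hlenL]; omega), List.getElem?_eq_none (by rw [hlen]; omega)]

-- ===== VERDICT (by name: the statement is the Claim_ definition above) =====
theorem get_interval_content_spec : Claim_equal_get_interval_content := by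
  intro chord _
  unfold Spec_get_interval_content
  exact pv_main chord
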